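-- pv_equiv track=rewrite | github.com/JomaMinoza/spike | spike/models/embedding.py | get_polynomial_feature_names
-- ===== SOURCE A (Python) =====
-- import itertools
-- from typing import List, Tuple, Optional, Dict
--
-- def get_polynomial_feature_names(
--     input_dim: int,
--     degree: int,
--     var_names: Optional[List[str]] = None
-- ) -> List[str]:
--     """Get human-readable names for polynomial features."""
--     if var_names is None:
--         var_names = [f'x{i}' for i in range(input_dim)]
--
--     names = ['1']  # Constant term
--
--     for d in range(1, degree + 1):
--         for combo in itertools.combinations_with_replacement(range(input_dim), d):
--             counts = {}
--             for idx in combo: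
--                 counts[idx] = counts.get(idx, 0) + 1
--
--             parts = []
--             for idx, count in sorted(counts.items()):
--                 if count == 1:
--                     parts.append(var_names[idx])
--                 else:
--                     parts.append(f'{var_names[idx]}^{count}')
--             names.append('*'.join(parts) if len(parts) > 1 else parts[0])
--
--     return names
-- ===== SOURCE B (Python) =====
-- from typing import List, Optional
--
-- def get_polynomial_feature_names(
--     input_dim: int,
--     degree: int,
--     var_names: Optional[List[str]] = None
-- ) -> List[str]:
--     """Get human-readable names for polynomial features."""
--     if var_names is None:
--         var_names = [f'x{i}' for i in range(input_dim)]
--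
--     names = ['1']  # Constant term
--
--     def rec(idx, rem, parts):
--         if rem == 0:
--             names.append('*'.join(parts))
--             return
--         if idx >= input_dim:
--             return
--         for e in range(rem, -1, -1):
--             if e == 0:
--                 rec(idx + 1, rem, parts)
--             elif e == 1:
--                 rec(idx + 1, rem - 1, parts + [var_names[idx]])
--             else:
--                 rec(idx + 1, rem - e, parts + [f'{var_names[idx]}^{e}'])
--
--     for d in range(1, degree + 1):
--         rec(0, d, [])
--
--     return names
-- ===== Notes on version B (the rewrite author's own statement) =====
-- stated objective: alternative
-- what changed: Replaces itertools.combinations_with_replacement plus a per-combo counting dict and sort with a direct recursive monomial generator that assigns each variable an exponent (high to low) and builds each name string incrementally, so no dict, no sort and no per-combo recount are needed.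
import Mathlib
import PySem

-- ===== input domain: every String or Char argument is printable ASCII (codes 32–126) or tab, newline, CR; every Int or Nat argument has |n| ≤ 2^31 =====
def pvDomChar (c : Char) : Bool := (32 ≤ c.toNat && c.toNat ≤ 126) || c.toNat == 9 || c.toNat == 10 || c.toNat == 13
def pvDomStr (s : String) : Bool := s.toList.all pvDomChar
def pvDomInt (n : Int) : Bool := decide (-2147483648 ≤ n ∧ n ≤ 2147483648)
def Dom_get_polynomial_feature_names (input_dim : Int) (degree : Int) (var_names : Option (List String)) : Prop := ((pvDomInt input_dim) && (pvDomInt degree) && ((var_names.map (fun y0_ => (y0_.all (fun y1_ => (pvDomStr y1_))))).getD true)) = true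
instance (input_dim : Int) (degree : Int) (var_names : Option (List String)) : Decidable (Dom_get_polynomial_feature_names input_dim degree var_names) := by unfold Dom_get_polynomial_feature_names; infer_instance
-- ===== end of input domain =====

-- B replaces itertools.combinations_with_replacement + a per-combo counting dict + sort by a direct
-- recursive exponent-assignment generator that emits each name in the same order (objective: alternative).

-- ===== PORT A =====
-- hand port of list(itertools.combinations_with_replacement(pool, d)): exact — CPython yields the
-- nondecreasing index tuples in lexicographic order, which is: tuples starting with the first pool
-- element (prefixed onto every (d-1)-tuple over the same pool) first, then tuples over the rest.
def pvCWR : List Int → Nat → List (List Int)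
  | _, 0 => [[]]
  | [], _ + 1 => []
  | x :: xs, d + 1 => ((pvCWR (x :: xs) d).map (fun c => x :: c)) ++ pvCWR xs (d + 1)
  termination_by pool d => (pool.length, d)

-- the body of A's inner loop: counts dict, sorted items, parts, joined name.
-- Python sorts the (idx, count) tuples; the keys are distinct ints, so sorting by the key alone is exact.
-- var_names[idx] is PySem.List.pyGetD vn idx "" — in range for every input admitted by Pre_ below.
-- parts[0] is pyGetD parts 0 "" — parts is nonempty whenever A evaluates it (combo has d ≥ 1 entries).
def pvNameOf (vn : List String) (combo : List Int) : String :=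
  let counts := combo.foldl (fun d i => d.insert i (d.getD i 0 + 1)) (PySem.Dict.empty : PySem.Dict Int Int)
  let items := PySem.List.sorted counts.items (fun p => p.1)
  let parts := items.map (fun p =>
    if p.2 = 1 then PySem.List.pyGetD vn p.1 ""
    else PySem.List.pyGetD vn p.1 "" ++ "^" ++ PySem.Int.toStr p.2)
  if parts.length > 1 then PySem.Str.join "*" parts else PySem.List.pyGetD parts 0 ""

def get_polynomial_feature_names (input_dim : Int) (degree : Int) (var_names : Option (List String)) : List String :=
  let vn := match var_names with
    | none => (PySem.List.pyRange 0 input_dim 1).map (fun i => "x" ++ PySem.Int.toStr i)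
    | some v => v
  (PySem.List.pyRange 1 (degree + 1) 1).foldl
    (fun names d =>
      (pvCWR (PySem.List.pyRange 0 input_dim 1) d.toNat).foldl
        (fun names combo => names ++ [pvNameOf vn combo]) names)
    ["1"]

-- ===== PORT B =====
-- B's rec(idx, rem, parts): fuel = input_dim - idx (fuel = 0 is B's 'idx >= input_dim' guard);
-- returns the list of names this call appends.  var_names[idx] is pyGetD (in range under Pre_).
def pvMono (vn : List String) : Nat → Int → Int → List String → List String
  | fuel, idx, rem, parts =>
    if rem = 0 then [PySem.Str.join "*" parts]
    else match fuel with
      | 0 => []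
      | f + 1 =>
        (PySem.List.pyRange rem (-1) (-1)).flatMap (fun e =>
          if e = 0 then pvMono vn f (idx + 1) rem parts
          else if e = 1 then pvMono vn f (idx + 1) (rem - 1) (parts ++ [PySem.List.pyGetD vn idx ""])
          else pvMono vn f (idx + 1) (rem - e) (parts ++ [PySem.List.pyGetD vn idx "" ++ "^" ++ PySem.Int.toStr e]))

def get_polynomial_feature_names_alt (input_dim : Int) (degree : Int) (var_names : Option (List String)) : List String :=
  let vn := match var_names with
    | none => (PySem.List.pyRange 0 input_dim 1).map (fun i => "x" ++ PySem.Int.toStr i)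
    | some v => v
  ["1"] ++ (PySem.List.pyRange 1 (degree + 1) 1).flatMap (fun d => pvMono vn input_dim.toNat 0 d [])

-- ===== PRECONDITION & SPEC =====
-- A raises IndexError exactly when var_names is supplied shorter than input_dim while some term
-- indexes it (input_dim ≥ 1 and degree ≥ 1); Pre_ excludes exactly those inputs.
def Pre_get_polynomial_feature_names (input_dim : Int) (degree : Int) (var_names : Option (List String)) : Prop :=
  var_names = none ∨ input_dim ≤ ((var_names.getD []).length : Int) ∨ degree ≤ 0 ∨ input_dim ≤ 0
instance (input_dim : Int) (degree : Int) (var_names : Option (List String)) : Decidable (Pre_get_polynomial_feature_names input_dim degree var_names) := by unfold Pre_get_polynomial_feature_names; infer_instance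

def pvWitness_get_polynomial_feature_names : Int × Int × Option (List String) := (2, 3, some ["a", "b"])

def Spec_get_polynomial_feature_names (input_dim : Int) (degree : Int) (var_names : Option (List String)) (out : List String) : Prop := out = get_polynomial_feature_names_alt input_dim degree var_names
instance (input_dim : Int) (degree : Int) (var_names : Option (List String)) (out : List String) : Decidable (Spec_get_polynomial_feature_names input_dim degree var_names out) := by unfold Spec_get_polynomial_feature_names; infer_instance

-- ===== CLAIM (what is proved, stated in full; the proofs are below) =====
def Claim_equal_get_polynomial_feature_names : Prop := ∀ (input_dim : Int) (degree : Int) (var_names : Option (List String)), Dom_get_polynomial_feature_names input_dim degree var_names → Pre_get_polynomial_feature_names input_dim degree var_names → Spec_get_polynomial_feature_names input_dim degree var_names (get_polynomial_feature_names input_dim degree var_names)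

-- ===== LEMMAS AND PROOFS =====

-- Exponent vectors: pvExp fuel rem lists, in B's emission order, the exponent prefixes (head
-- exponent counted down from rem) that exhaust rem within fuel variables; a vector stops exactly
-- when rem reaches 0, mirroring pvMono.
def pvExp : Nat → Nat → List (List Nat)
  | _, 0 => [[]]
  | 0, _ + 1 => []
  | f + 1, r + 1 =>
    ((List.range (r + 2)).map (fun k => (r + 1) - k)).flatMap
      (fun e => (pvExp f (r + 1 - e)).map (e :: ·))

-- name fragments B accumulates for exponent vector v starting at variable idx
def pvParts (vn : List String) : Int → List Nat → List String
  | _, [] => []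
  | idx, e :: rest =>
    if e = 0 then pvParts vn (idx + 1) rest
    else if e = 1 then PySem.List.pyGetD vn idx "" :: pvParts vn (idx + 1) rest
    else (PySem.List.pyGetD vn idx "" ++ "^" ++ PySem.Int.toStr (e : Int)) :: pvParts vn (idx + 1) rest

-- the combination (sorted index multiset) an exponent vector denotes
def pvFlat : Int → List Nat → List Int
  | _, [] => []
  | idx, e :: rest => List.replicate e idx ++ pvFlat (idx + 1) rest

-- the (index, positive exponent) run-length pairs of that combination, in index order
def pvPairs : Int → List Nat → List (Int × Nat)
  | _, [] => []
  | idx, e :: rest => if e = 0 then pvPairs (idx + 1) rest else (idx, e) :: pvPairs (idx + 1) rest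

theorem pvMono_eq (vn : List String) :
    ∀ (fuel : Nat) (idx : Int) (rem : Nat) (parts : List String),
      pvMono vn fuel idx (rem : Int) parts
        = (pvExp fuel rem).map (fun v => PySem.Str.join "*" (parts ++ pvParts vn idx v)) := by
  intro fuel
  induction fuel with
  | zero =>
    intro idx rem parts
    cases rem with
    | zero => simp [pvMono, pvExp, pvParts]
    | succ r =>
      rw [pvMono]
      simp only [pvExp, List.map_nil]
      rw [if_neg (by omega : ¬ (((r+1 : Nat)) : Int) = 0)]
  | succ f ih =>
    intro idx rem parts
    cases rem with
    | zero => simp [pvMono, pvExp, pvParts]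
    | succ r =>
      rw [pvMono]
      rw [if_neg (by omega : ¬ (((r+1 : Nat)) : Int) = 0)]
      rw [PySem.List.pyRange_neg_one]
      have h2 : (((r + 1 : Nat) : Int) - (-1)).toNat = r + 2 := by omega
      rw [h2, pvExp, List.flatMap_map, List.map_flatMap, List.flatMap_map]
      apply List.flatMap_congr
      intro k hk
      have hk' : k < r + 2 := List.mem_range.mp hk
      simp only [List.map_map]
      have hke : r + 1 - (r + 1 - k) = k := by omega
      rw [hke]
      have he : ((r + 1 : Nat) : Int) - (k : Int) = ((r + 1 - k : Nat) : Int) := by omega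
      rw [he]
      by_cases h0 : r + 1 - k = 0
      · rw [if_pos (by exact_mod_cast congrArg (Nat.cast (R := Int)) h0)]
        have hkr : k = r + 1 := by omega
        subst hkr
        rw [ih (idx + 1) (r + 1) parts]
        apply List.map_congr_left
        intro v hv
        simp [Function.comp, pvParts]
      · by_cases h1 : r + 1 - k = 1
        · rw [if_neg (by omega : ¬ ((r + 1 - k : Nat) : Int) = 0),
              if_pos (by exact_mod_cast congrArg (Nat.cast (R := Int)) h1)]
          rw [show ((r + 1 : Nat) : Int) - 1 = ((k : Nat) : Int) by omega]
          rw [ih (idx + 1) k (parts ++ [PySem.List.pyGetD vn idx ""])]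
          apply List.map_congr_left
          intro v hv
          simp [pvParts, h1]
        · rw [if_neg (by omega : ¬ ((r + 1 - k : Nat) : Int) = 0),
              if_neg (by omega : ¬ ((r + 1 - k : Nat) : Int) = 1)]
          rw [show ((r + 1 : Nat) : Int) - ((r + 1 - k : Nat) : Int) = ((k : Nat) : Int) by omega]
          rw [ih (idx + 1) k (parts ++ [PySem.List.pyGetD vn idx "" ++ "^" ++ PySem.Int.toStr ((r + 1 - k : Nat) : Int)])]
          apply List.map_congr_left
          intro v hv
          simp only [Function.comp, pvParts, if_neg h0, if_neg h1,
            List.append_assoc, List.singleton_append]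

theorem pvCWR_cons (x : Int) (xs : List Int) :
    ∀ d : Nat, pvCWR (x :: xs) d
      = ((List.range (d + 1)).map (fun k => d - k)).flatMap
          (fun e => (pvCWR xs (d - e)).map (fun c => List.replicate e x ++ c)) := by
  intro d
  induction d with
  | zero => simp [pvCWR]
  | succ d ih =>
    rw [pvCWR, ih]
    rw [List.map_flatMap]
    -- RHS: split range (d+2) = range (d+1) ++ [d+1]
    rw [show List.range (d + 1 + 1) = List.range (d + 1) ++ [d + 1] from List.range_succ]
    rw [List.map_append, List.flatMap_append, List.flatMap_map, List.flatMap_map]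
    congr 1
    · apply List.flatMap_congr
      intro k hk
      have hk' : k < d + 1 := List.mem_range.mp hk
      simp only [List.map_map]
      have h1 : d - (d - k) = k := by omega
      have h2 : d + 1 - (d + 1 - k) = k := by omega
      rw [h1, h2]
      apply List.map_congr_left
      intro c hc
      have h3 : d + 1 - k = (d - k) + 1 := by omega
      rw [h3, List.replicate_succ, List.cons_append]
      rfl
    · simp

theorem pvCWR_range (fuel : Nat) :
    ∀ (idx n : Int), fuel = (n - idx).toNat →
      ∀ d : Nat, pvCWR (PySem.List.pyRange idx n 1) d = (pvExp fuel d).map (pvFlat idx) := by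
  induction fuel with
  | zero =>
    intro idx n h d
    rw [PySem.List.pyRange_one_eq_nil (by omega)]
    cases d with
    | zero => simp [pvCWR, pvExp, pvFlat]
    | succ r => simp [pvCWR, pvExp]
  | succ f ih =>
    intro idx n h d
    rw [PySem.List.pyRange_one_cons (by omega : idx < n)]
    rw [pvCWR_cons]
    cases d with
    | zero =>
      simp [pvExp, pvFlat, ih (idx + 1) n (by omega)]
    | succ r =>
      rw [pvExp, List.map_flatMap, List.flatMap_map, List.flatMap_map]
      apply List.flatMap_congr
      intro k hk
      have hk' : k < r + 2 := List.mem_range.mp hk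
      simp only [List.map_map]
      rw [ih (idx + 1) n (by omega) (r + 1 - (r + 1 - k))]
      rw [show r + 1 - (r + 1 - k) = k by omega]
      rw [List.map_map]
      apply List.map_congr_left
      intro v hv
      simp [pvFlat]

theorem pvFlat_mem_le : ∀ (v : List Nat) (idx x : Int), x ∈ pvFlat idx v → idx ≤ x := by
  intro v
  induction v with
  | nil => intro idx x hx; simp [pvFlat] at hx
  | cons e rest ih =>
    intro idx x hx
    simp only [pvFlat, List.mem_append, List.mem_replicate] at hx
    rcases hx with ⟨_, rfl⟩ | hx
    · omega
    · have := ih (idx + 1) x hx; omega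

theorem pvPairs_mem_le : ∀ (v : List Nat) (idx : Int) (q : Int × Nat), q ∈ pvPairs idx v → idx ≤ q.1 := by
  intro v
  induction v with
  | nil => intro idx q hq; simp [pvPairs] at hq
  | cons e rest ih =>
    intro idx q hq
    simp only [pvPairs] at hq
    split at hq
    · have := ih (idx + 1) q hq; omega
    · rcases List.mem_cons.mp hq with rfl | hq
      · omega
      · have := ih (idx + 1) q hq; omega

theorem pvUpdate_replicate_mem : ∀ (e : Nat) (s : PySem.Set Int) (x : Int), x ∈ s →
    PySem.Set.update s (List.replicate e x) = s := by
  intro e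
  induction e with
  | zero => intro s x _; rfl
  | succ e ih =>
    intro s x hx
    rw [List.replicate_succ]
    show PySem.Set.update (PySem.Set.add s x) (List.replicate e x) = s
    rw [PySem.Set.add_of_mem hx]  -- guess name
    exact ih s x hx

theorem pvUpdate_replicate_not_mem : ∀ (e : Nat) (s : PySem.Set Int) (x : Int), 0 < e → x ∉ s →
    PySem.Set.update s (List.replicate e x) = s ++ [x] := by
  intro e s x he hx
  cases e with
  | zero => omega
  | succ e =>
    rw [List.replicate_succ]
    show PySem.Set.update (PySem.Set.add s x) (List.replicate e x) = s ++ [x]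
    rw [PySem.Set.add_of_not_mem hx]  -- guess name
    exact pvUpdate_replicate_mem e (s ++ [x]) x (by simp)

theorem pvKeys : ∀ (v : List Nat) (idx : Int) (s : PySem.Set Int), (∀ x ∈ s, x < idx) →
    PySem.Set.update s (pvFlat idx v) = s ++ (pvPairs idx v).map (·.1) := by
  intro v
  induction v with
  | nil => intro idx s _; simp [pvFlat, pvPairs]
  | cons e rest ih =>
    intro idx s hs
    show PySem.Set.update s (List.replicate e idx ++ pvFlat (idx + 1) rest) = _
    rw [show ∀ (s : PySem.Set Int) l1 l2, PySem.Set.update s (l1 ++ l2) = PySem.Set.update (PySem.Set.update s l1) l2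
        from fun s l1 l2 => List.foldl_append]
    by_cases he : e = 0
    · subst he
      rw [show List.replicate 0 idx = [] from rfl]
      rw [show PySem.Set.update s [] = s from rfl]
      rw [ih (idx + 1) s (fun x hx => by have := hs x hx; omega)]
      simp [pvPairs]
    · rw [pvUpdate_replicate_not_mem e s idx (by omega) (fun h => by have := hs idx h; omega)]
      rw [ih (idx + 1) (s ++ [idx]) (by
        intro x hx
        simp only [List.mem_append, List.mem_singleton] at hx
        rcases hx with hx | rfl
        · have := hs x hx; omega
        · omega)]
      simp [pvPairs, he]

theorem pvCount : ∀ (v : List Nat) (idx : Int) (q : Int × Nat), q ∈ pvPairs idx v →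
    (pvFlat idx v).count q.1 = q.2 := by
  intro v
  induction v with
  | nil => intro idx q hq; simp [pvPairs] at hq
  | cons e rest ih =>
    intro idx q hq
    have hcount : ∀ (y : Int), (pvFlat idx (e :: rest)).count y
        = (List.replicate e idx).count y + (pvFlat (idx + 1) rest).count y := by
      intro y; simp [pvFlat, List.count_append]
    simp only [pvPairs] at hq
    split at hq
    · -- e = 0
      next he =>
      subst he
      rw [hcount]
      have hq1 := pvPairs_mem_le rest (idx + 1) q hq
      rw [List.count_replicate, if_neg (by simp; omega)]
      simpa using ih (idx + 1) q hq
    · rcases List.mem_cons.mp hq with rfl | hq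
      · rw [hcount]
        simp only [List.count_replicate, beq_self_eq_true, if_pos]
        have : (pvFlat (idx + 1) rest).count idx = 0 := by
          rw [List.count_eq_zero]
          intro h; have := pvFlat_mem_le rest (idx + 1) idx h; omega
        simp [this]
      · rw [hcount]
        have hq1 := pvPairs_mem_le rest (idx + 1) q hq
        rw [List.count_replicate, if_neg (by simp; omega)]
        simpa using ih (idx + 1) q hq

theorem pvPairs_pairwise : ∀ (v : List Nat) (idx : Int), (pvPairs idx v).Pairwise (fun a b => a.1 < b.1) := by
  intro v
  induction v with
  | nil => intro idx; simp [pvPairs]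
  | cons e rest ih =>
    intro idx
    simp only [pvPairs]
    split
    · exact ih (idx + 1)
    · exact List.Pairwise.cons (fun q hq => by have := pvPairs_mem_le rest (idx + 1) q hq; omega) (ih (idx + 1))

theorem pvItems (v : List Nat) (idx : Int) :
    ((pvFlat idx v).foldl (fun d i => d.insert i (d.getD i 0 + 1)) (PySem.Dict.empty : PySem.Dict Int Int)).items
      = (pvPairs idx v).map (fun q => (q.1, (q.2 : Int))) := by
  have hnd : ((pvFlat idx v).foldl (fun d i => d.insert i (d.getD i 0 + 1)) (PySem.Dict.empty : PySem.Dict Int Int)).keys.Nodup :=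
    PySem.Dict.nodup_keys_foldl_insert _ _ _ (by simp [PySem.Dict.keys_empty])
  rw [PySem.Dict.items_eq_map_keys _ hnd 0]
  rw [PySem.Dict.keys_foldl_insert]
  rw [PySem.Dict.keys_empty]
  rw [pvKeys v idx [] (by simp)]
  rw [List.nil_append, List.map_map]
  apply List.map_congr_left
  intro q hq
  simp only [Function.comp]
  rw [PySem.Dict.getD_foldl_insert_add_one]
  rw [PySem.Dict.getD_empty]
  rw [pvCount v idx q hq]
  simp

theorem pvJoinIf (parts : List String) :
    (if parts.length > 1 then PySem.Str.join "*" parts else PySem.List.pyGetD parts 0 "") = PySem.Str.join "*" parts := by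
  match parts with
  | [] => rfl
  | [p] => simp [PySem.List.pyGetD, PySem.Str.join]
  | p :: q :: rest => rfl

theorem pvNameOf_flat (vn : List String) :
    ∀ (v : List Nat) (idx : Int),
      pvNameOf vn (pvFlat idx v) = PySem.Str.join "*" (pvParts vn idx v) := by
  intro v idx
  unfold pvNameOf
  dsimp only
  rw [pvItems v idx]
  rw [PySem.List.sorted_eq_of_perm_of_pairwise_lt _ _ _ (List.Perm.refl _)
    (by
      apply List.Pairwise.map
      · intro a b h; exact h
      · exact pvPairs_pairwise v idx)]
  rw [pvJoinIf]
  congr 1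
  rw [List.map_map]
  -- map over pvPairs = pvParts
  induction v generalizing idx with
  | nil => simp [pvPairs, pvParts]
  | cons e rest ih =>
    simp only [pvPairs, pvParts]
    by_cases he : e = 0
    · subst he; simp only [reduceIte]; exact ih (idx + 1)
    · rw [if_neg he, if_neg he, List.map_cons]
      by_cases h1 : e = 1
      · subst h1
        simp only [Function.comp, Nat.cast_one]
        simp only [if_true]
        rw [ih (idx + 1)]
      · have : ¬ ((e : Nat) : Int) = 1 := by omega
        simp only [Function.comp, if_neg h1, if_neg this]
        rw [ih (idx + 1)]


-- both programs, for a fixed resolved variable-name list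
theorem pvMain (vn : List String) (input_dim degree : Int) :
    (PySem.List.pyRange 1 (degree + 1) 1).foldl
      (fun names d =>
        (pvCWR (PySem.List.pyRange 0 input_dim 1) d.toNat).foldl
          (fun names combo => names ++ [pvNameOf vn combo]) names)
      ["1"]
    = ["1"] ++ (PySem.List.pyRange 1 (degree + 1) 1).flatMap (fun d => pvMono vn input_dim.toNat 0 d []) := by
  refine Eq.trans (PySem.List.foldl_congr_mem
    (l := PySem.List.pyRange 1 (degree + 1) 1) (init := ["1"])
    (f := fun (names : List String) (d : Int) =>
      (pvCWR (PySem.List.pyRange 0 input_dim 1) d.toNat).foldl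
        (fun names combo => names ++ [pvNameOf vn combo]) names)
    (g := fun (names : List String) (d : Int) =>
      names ++ (pvCWR (PySem.List.pyRange 0 input_dim 1) d.toNat).map (pvNameOf vn))
    (by intro acc d _; dsimp only; rw [PySem.List.foldl_append_singleton_eq_map])) ?_
  rw [PySem.List.foldl_append_eq_flatMap]
  congr 1
  apply List.flatMap_congr
  intro d hd
  have hd1 : 1 ≤ d := (PySem.List.mem_pyRange_one.mp hd).1
  rw [pvCWR_range input_dim.toNat 0 input_dim (by omega) d.toNat]
  rw [List.map_map]
  rw [show d = ((d.toNat : Nat) : Int) by omega, pvMono_eq vn input_dim.toNat 0 d.toNat []]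
  apply List.map_congr_left
  intro v hv
  simp only [Function.comp, List.nil_append]
  exact pvNameOf_flat vn v 0

-- ===== VERDICT (by name: the statement is the Claim_ definition above) =====
theorem get_polynomial_feature_names_spec : Claim_equal_get_polynomial_feature_names := by
  intro input_dim degree var_names _ _
  unfold Spec_get_polynomial_feature_names get_polynomial_feature_names get_polynomial_feature_names_alt
  cases var_names with
  | none => exact pvMain _ input_dim degree
  | some v => exact pvMain v input_dim degree
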